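-- pv_equiv track=rewrite | github.com/Aden-y/SPSP-python | main.py | isspsp
-- ===== SOURCE A (Python) =====
-- def isspsp(x):
--     for n in range(2, x):
--         if isPrime(n):
--             for s in range(2, x):
--                 if s*s >=x :
--                     break
--                 if isPrime(s):
--                     if n + (s*s) == x:
--                         return True
--
--     return False
--
-- def isPrime(x):
--     if x == 2:
--         return True
--     for n in range(2,x):
--         if not n==x and  x%n==0:
--             return False
--     return True
-- ===== SOURCE B (Python) =====
-- def isspsp(x):
--     s = 2
--     while s * s < x:
--         if _is_prime(s) and _is_prime(x - s * s):
--             return True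
--         s += 1
--     return False
--
--
-- def _is_prime(m):
--     if m < 2:
--         return False
--     d = 2
--     while d * d <= m:
--         if m % d == 0:
--             return False
--         d += 1
--     return True
-- ===== Notes on version B (the rewrite author's own statement) =====
-- stated objective: faster
-- what changed: A scans every n in range(2,x) with full-range trial-division primality plus a nested s-loop; B runs a single loop over s with s*s<x and checks s and x-s*s with sqrt-bounded trial division.
import Mathlib
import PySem

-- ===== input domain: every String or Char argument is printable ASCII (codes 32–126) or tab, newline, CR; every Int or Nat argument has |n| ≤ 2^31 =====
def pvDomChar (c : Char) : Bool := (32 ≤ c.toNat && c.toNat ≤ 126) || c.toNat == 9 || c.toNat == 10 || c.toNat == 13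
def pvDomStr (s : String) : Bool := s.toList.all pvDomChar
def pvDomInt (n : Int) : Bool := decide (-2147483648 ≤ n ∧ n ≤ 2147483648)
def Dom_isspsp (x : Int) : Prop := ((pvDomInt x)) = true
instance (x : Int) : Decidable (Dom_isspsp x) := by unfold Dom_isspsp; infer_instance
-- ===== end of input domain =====

-- B replaces A's O(x)·O(x)·O(x) triple scan by a single loop over s with s² < x,
-- testing x−s² directly with √-bounded trial division (objective: faster).

-- ===== PORT A =====
-- A's isPrime: trial division over the whole of range(2, x)
def isPrimeA (x : Int) : Bool :=
  if x == 2 then true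
  else (PySem.List.pyRange 2 x 1).all
    (fun n => !(!(n == x) && (PySem.Int.mod x n == 0)))

-- A's inner 'for s in range(2, x)' with the 'break' at s*s >= x
def isspspInner (x n : Int) : List Int → Bool
  | [] => false
  | s :: rest =>
    if s * s ≥ x then false
    else if isPrimeA s && (n + s * s == x) then true
    else isspspInner x n rest

def isspsp (x : Int) : Bool :=
  (PySem.List.pyRange 2 x 1).any
    (fun n => isPrimeA n && isspspInner x n (PySem.List.pyRange 2 x 1))

-- ===== PORT B =====
-- B's _is_prime: trial division with d*d <= m only
def isPrimeBLoop (m d : Int) : Bool :=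
  if _h : d * d ≤ m then
    if PySem.Int.mod m d == 0 then false
    else isPrimeBLoop m (d + 1)
  else true
termination_by (m + 1 - d).toNat
decreasing_by
  have hdm : d ≤ m := by nlinarith [sq_nonneg d]
  omega

def isPrimeB (m : Int) : Bool :=
  if m < 2 then false else isPrimeBLoop m 2

-- B's 'while s * s < x' loop
def isspspLoopB (x s : Int) : Bool :=
  if _h : s * s < x then
    if isPrimeB s && isPrimeB (x - s * s) then true
    else isspspLoopB x (s + 1)
  else false
termination_by (x - s).toNat
decreasing_by
  have hsx : s < x := by nlinarith [sq_nonneg s]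
  omega

def isspsp_alt (x : Int) : Bool := isspspLoopB x 2

-- ===== PRECONDITION & SPEC =====
def Spec_isspsp (x : Int) (out : Bool) : Prop := out = isspsp_alt x
instance (x : Int) (out : Bool) : Decidable (Spec_isspsp x out) := by unfold Spec_isspsp; infer_instance

-- ===== CLAIM (what is proved, stated in full; the proofs are below) =====
def Claim_equal_isspsp : Prop := ∀ (x : Int), Dom_isspsp x → Spec_isspsp x (isspsp x)

-- ===== LEMMAS AND PROOFS =====

-- Int/Nat divisibility bridge
theorem dvd_toNat_iff {e m : Int} (he : 0 ≤ e) (hm : 0 ≤ m) :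
    e ∣ m ↔ e.toNat ∣ m.toNat := by
  rw [← Int.natCast_dvd_natCast, Int.toNat_of_nonneg he, Int.toNat_of_nonneg hm]

-- A's isPrime, on arguments ≥ 2, decides primality
theorem primeA_iff (m : Int) (hm : 2 ≤ m) :
    isPrimeA m = true ↔ Nat.Prime m.toNat := by
  rw [isPrimeA]
  rcases eq_or_ne m 2 with h2 | h2
  · subst h2; norm_num
    decide
  · have hne : (m == 2) = false := beq_eq_false_iff_ne.mpr h2
    rw [hne]
    simp only [Bool.false_eq_true, if_false, List.all_eq_true]
    constructor
    · intro h
      rw [Nat.prime_def_lt]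
      refine ⟨by omega, ?_⟩
      intro k hk hdvd
      by_contra hk1
      have hk0 : k ≠ 0 := by
        rintro rfl
        have := Nat.eq_zero_of_zero_dvd hdvd
        omega
      have hmem : (k : Int) ∈ PySem.List.pyRange 2 m 1 := by
        rw [PySem.List.mem_pyRange_one]
        constructor
        · exact_mod_cast (by omega : (2:ℕ) ≤ k)
        · have : (k : Int) < (m.toNat : Int) := by exact_mod_cast hk
          omega
      have hb := h _ hmem
      have hdvd' : (k : Int) ∣ m := by
        rw [dvd_toNat_iff (by positivity) (by omega)]
        simpa using hdvd
      have hmod : PySem.Int.mod m (k : Int) = 0 :=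
        (PySem.Int.mod_eq_zero_iff_dvd m _).mpr hdvd'
      have hkm : ((k : Int) == m) = false := by
        simp only [beq_eq_false_iff_ne, ne_eq]
        intro hkm
        rw [PySem.List.mem_pyRange_one] at hmem
        omega
      simp [hkm, hmod] at hb
    · intro hp n hmem
      rw [PySem.List.mem_pyRange_one] at hmem
      have hnm : (n == m) = false := by
        simp only [beq_eq_false_iff_ne, ne_eq]; omega
      simp only [hnm, Bool.not_false, Bool.true_and, Bool.not_eq_eq_eq_not, Bool.not_true,
        beq_eq_false_iff_ne, ne_eq]
      intro hmod
      have hdvd : n ∣ m := (PySem.Int.mod_eq_zero_iff_dvd m n).mp hmod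
      rw [dvd_toNat_iff (by omega) (by omega)] at hdvd
      have := (Nat.prime_def_lt.mp hp).2 n.toNat (by omega) hdvd
      omega

-- B's trial-division loop
theorem primeBLoop_iff (m : Int) : ∀ d : Int, 2 ≤ d →
    (isPrimeBLoop m d = true ↔ ∀ e : Int, d ≤ e → e * e ≤ m → ¬ e ∣ m) := by
  have key : ∀ k : Nat, ∀ d : Int, (m + 1 - d).toNat = k → 2 ≤ d →
      (isPrimeBLoop m d = true ↔ ∀ e : Int, d ≤ e → e * e ≤ m → ¬ e ∣ m) := by
    intro k
    induction k using Nat.strong_induction_on with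
    | _ k ih =>
      intro d hk hd
      rw [isPrimeBLoop]
      by_cases hdm : d * d ≤ m
      · rw [dif_pos hdm]
        have hdm' : d ≤ m := by nlinarith
        by_cases hmod : PySem.Int.mod m d = 0
        · have hb : (PySem.Int.mod m d == 0) = true := by simp [hmod]
          rw [hb, if_pos rfl]
          simp only [Bool.false_eq_true, false_iff]
          intro hall
          exact hall d le_rfl hdm ((PySem.Int.mod_eq_zero_iff_dvd m d).mp hmod)
        · have hb : (PySem.Int.mod m d == 0) = false := by simp [hmod]
          rw [hb]
          simp only [Bool.false_eq_true, if_false]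
          rw [ih (m + 1 - (d + 1)).toNat (by omega) (d + 1) rfl (by omega)]
          constructor
          · intro h e hde hem
            rcases eq_or_lt_of_le hde with rfl | hlt
            · intro hdvd
              exact hmod ((PySem.Int.mod_eq_zero_iff_dvd m _).mpr hdvd)
            · exact h e (by omega) hem
          · intro h e hde hem
            exact h e (by omega) hem
      · rw [dif_neg hdm]
        simp only [true_iff]
        intro e hde hem
        exfalso
        have : d * d ≤ e * e := by nlinarith
        omega
  intro d
  exact key (m + 1 - d).toNat d rfl

-- B's _is_prime decides (2 ≤ m and prime)
theorem primeB_iff (m : Int) :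
    isPrimeB m = true ↔ 2 ≤ m ∧ Nat.Prime m.toNat := by
  rw [isPrimeB]
  by_cases hm : m < 2
  · rw [if_pos hm]
    simp only [Bool.false_eq_true, false_iff, not_and]
    intro h; omega
  · rw [if_neg hm]
    push_neg at hm
    rw [primeBLoop_iff m 2 (by omega)]
    constructor
    · intro h
      refine ⟨hm, ?_⟩
      rw [Nat.prime_def_le_sqrt]
      refine ⟨by omega, ?_⟩
      intro e he hesq hdvd
      refine h (e : Int) (by exact_mod_cast he) ?_ ?_
      · have := (Nat.le_sqrt.mp hesq)
        have hmn : ((e * e : ℕ) : Int) ≤ ((m.toNat : ℕ) : Int) := by exact_mod_cast this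
        push_cast at hmn
        omega
      · rw [dvd_toNat_iff (by positivity) (by omega)]
        simpa using hdvd
    · rintro ⟨-, hp⟩ e hde hem hdvd
      rw [Nat.prime_def_le_sqrt] at hp
      refine hp.2 e.toNat (by omega) ?_ ?_
      · rw [Nat.le_sqrt]
        have : (e.toNat * e.toNat : Int) ≤ (m.toNat : Int) := by
          rw [Int.toNat_of_nonneg (by omega : (0:Int) ≤ e), Int.toNat_of_nonneg (by omega)]
          exact hem
        exact_mod_cast this
      · rwa [dvd_toNat_iff (by omega) (by omega)] at hdvd

-- A's inner loop over a tail of range(2, x)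
theorem innerA_iff (x n : Int) : ∀ a : Int, 2 ≤ a →
    (isspspInner x n (PySem.List.pyRange a x 1) = true ↔
      ∃ s : Int, a ≤ s ∧ s * s < x ∧ isPrimeA s = true ∧ n + s * s = x) := by
  have key : ∀ k : Nat, ∀ a : Int, (x - a).toNat = k → 2 ≤ a →
      (isspspInner x n (PySem.List.pyRange a x 1) = true ↔
        ∃ s : Int, a ≤ s ∧ s * s < x ∧ isPrimeA s = true ∧ n + s * s = x) := by
    intro k
    induction k using Nat.strong_induction_on with
    | _ k ih =>
      intro a hk ha
      by_cases hax : x ≤ a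
      · rw [PySem.List.pyRange_one_eq_nil hax]
        simp only [isspspInner, Bool.false_eq_true, false_iff, not_exists]
        rintro s ⟨hs, hsx, -, -⟩
        nlinarith
      · push_neg at hax
        rw [PySem.List.pyRange_one_cons hax]
        rw [isspspInner]
        by_cases hbreak : a * a ≥ x
        · rw [if_pos hbreak]
          simp only [Bool.false_eq_true, false_iff, not_exists]
          rintro s ⟨hs, hsx, -, -⟩
          nlinarith
        · rw [if_neg hbreak]
          push_neg at hbreak
          by_cases hhit : isPrimeA a = true ∧ n + a * a = x
          · have hb : (isPrimeA a && (n + a * a == x)) = true := by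
              simp [hhit.1, hhit.2]
            rw [if_pos hb]
            simp only [true_iff]
            exact ⟨a, le_refl a, hbreak, hhit.1, hhit.2⟩
          · have hb : (isPrimeA a && (n + a * a == x)) = false := by
              rcases Decidable.not_and_iff_or_not.mp hhit with h | h
              · simp [Bool.eq_false_iff.mpr h]
              · have : (n + a * a == x) = false := by simpa using h
                simp [this]
            rw [hb]
            simp only [Bool.false_eq_true, if_false]
            rw [ih (x - (a + 1)).toNat (by omega) (a + 1) rfl (by omega)]
            constructor
            · rintro ⟨s, hs, hsx, hp, hsum⟩
              exact ⟨s, by omega, hsx, hp, hsum⟩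
            · rintro ⟨s, hs, hsx, hp, hsum⟩
              rcases eq_or_lt_of_le hs with rfl | hlt
              · exact absurd ⟨hp, hsum⟩ hhit
              · exact ⟨s, by omega, hsx, hp, hsum⟩
  intro a
  exact key (x - a).toNat a rfl

-- B's while loop
theorem loopB_iff (x : Int) : ∀ s : Int, 2 ≤ s →
    (isspspLoopB x s = true ↔
      ∃ t : Int, s ≤ t ∧ t * t < x ∧ isPrimeB t = true ∧ isPrimeB (x - t * t) = true) := by
  have key : ∀ k : Nat, ∀ s : Int, (x - s).toNat = k → 2 ≤ s →
      (isspspLoopB x s = true ↔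
        ∃ t : Int, s ≤ t ∧ t * t < x ∧ isPrimeB t = true ∧ isPrimeB (x - t * t) = true) := by
    intro k
    induction k using Nat.strong_induction_on with
    | _ k ih =>
      intro s hk hs
      rw [isspspLoopB]
      by_cases hsx : s * s < x
      · rw [dif_pos hsx]
        have hsx' : s < x := by nlinarith
        by_cases hhit : isPrimeB s = true ∧ isPrimeB (x - s * s) = true
        · have hb : (isPrimeB s && isPrimeB (x - s * s)) = true := by
            simp [hhit.1, hhit.2]
          rw [if_pos hb]
          simp only [true_iff]
          exact ⟨s, le_refl s, hsx, hhit.1, hhit.2⟩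
        · have hb : (isPrimeB s && isPrimeB (x - s * s)) = false := by
            rcases Decidable.not_and_iff_or_not.mp hhit with h | h
            · simp [Bool.eq_false_iff.mpr h]
            · simp [Bool.eq_false_iff.mpr h]
          rw [hb]
          simp only [Bool.false_eq_true, if_false]
          rw [ih (x - (s + 1)).toNat (by omega) (s + 1) rfl (by omega)]
          constructor
          · rintro ⟨t, ht, htx, hp1, hp2⟩
            exact ⟨t, by omega, htx, hp1, hp2⟩
          · rintro ⟨t, ht, htx, hp1, hp2⟩
            rcases eq_or_lt_of_le ht with rfl | hlt
            · exact absurd ⟨hp1, hp2⟩ hhit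
            · exact ⟨t, by omega, htx, hp1, hp2⟩
      · rw [dif_neg hsx]
        simp only [Bool.false_eq_true, false_iff, not_exists]
        rintro t ⟨ht, htx, -, -⟩
        push_neg at hsx
        nlinarith
  intro s
  exact key (x - s).toNat s rfl

theorem main_eq (x : Int) : isspsp x = isspsp_alt x := by
  have hA : isspsp x = true ↔
      ∃ s : Int, 2 ≤ s ∧ s * s < x ∧ Nat.Prime s.toNat ∧
        2 ≤ x - s * s ∧ Nat.Prime (x - s * s).toNat := by
    rw [isspsp, List.any_eq_true]
    constructor
    · rintro ⟨n, hmem, hb⟩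
      rw [PySem.List.mem_pyRange_one] at hmem
      rw [Bool.and_eq_true] at hb
      obtain ⟨hpn, hinner⟩ := hb
      rw [innerA_iff x n 2 (by omega)] at hinner
      obtain ⟨s, hs, hsx, hps, hsum⟩ := hinner
      refine ⟨s, hs, hsx, (primeA_iff s (by omega)).mp hps, by omega, ?_⟩
      have : x - s * s = n := by omega
      rw [this]
      exact (primeA_iff n (by omega)).mp hpn
    · rintro ⟨s, hs, hsx, hps, hn2, hpn⟩
      refine ⟨x - s * s, ?_, ?_⟩
      · rw [PySem.List.mem_pyRange_one]
        constructor
        · omega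
        · nlinarith
      · rw [Bool.and_eq_true]
        refine ⟨(primeA_iff _ (by omega)).mpr hpn, ?_⟩
        rw [innerA_iff x _ 2 (by omega)]
        exact ⟨s, hs, hsx, (primeA_iff s (by omega)).mpr hps, by omega⟩
  have hB : isspsp_alt x = true ↔
      ∃ s : Int, 2 ≤ s ∧ s * s < x ∧ Nat.Prime s.toNat ∧
        2 ≤ x - s * s ∧ Nat.Prime (x - s * s).toNat := by
    rw [isspsp_alt, loopB_iff x 2 (by omega)]
    constructor
    · rintro ⟨t, ht, htx, hp1, hp2⟩
      rw [primeB_iff] at hp1 hp2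
      exact ⟨t, ht, htx, hp1.2, hp2.1, hp2.2⟩
    · rintro ⟨s, hs, hsx, hps, hn2, hpn⟩
      exact ⟨s, hs, hsx, (primeB_iff s).mpr ⟨by omega, hps⟩,
        (primeB_iff _).mpr ⟨hn2, hpn⟩⟩
  rw [Bool.eq_iff_iff, hA, hB]

-- ===== VERDICT (by name: the statement is the Claim_ definition above) =====
theorem isspsp_spec : Claim_equal_isspsp := by
  intro x _
  exact main_eq x
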